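-- pv_equiv track=rewrite | github.com/Ojitos369/hygabot | funciones/wardrobe.py | re_acomodo
-- ===== SOURCE A (Python) =====
-- def re_acomodo(data):
--     new_data = []
--     slots = int(len(data) / 8)
--     for i in range(slots):
--         new_data.append(data[i])
--         new_data.append(data[i + slots])
--         new_data.append(data[i + 2 * slots])
--         new_data.append(data[i + 3 * slots])
--
--     return new_data
-- ===== SOURCE B (Python) =====
-- def re_acomodo(data):
--     slots = len(data) // 8
--     chunks = [data[k * slots:(k + 1) * slots] for k in range(4)]
--     return [x for row in zip(*chunks) for x in row]
-- ===== Notes on version B (the rewrite author's own statement) =====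
-- stated objective: idiomatic
-- what changed: Replaces A's per-index arithmetic loop with slicing the data into four equal-width columns and transposing them via zip, flattening the rows.
import Mathlib
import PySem

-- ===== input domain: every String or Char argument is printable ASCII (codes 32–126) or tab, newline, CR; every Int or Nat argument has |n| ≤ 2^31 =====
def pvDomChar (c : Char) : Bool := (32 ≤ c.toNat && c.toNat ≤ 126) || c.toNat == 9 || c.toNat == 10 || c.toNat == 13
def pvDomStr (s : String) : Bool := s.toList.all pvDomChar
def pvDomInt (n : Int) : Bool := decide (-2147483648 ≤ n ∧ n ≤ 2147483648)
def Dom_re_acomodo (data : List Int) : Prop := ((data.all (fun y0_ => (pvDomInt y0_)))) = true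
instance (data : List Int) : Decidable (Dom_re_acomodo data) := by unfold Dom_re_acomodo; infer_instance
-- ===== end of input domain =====

-- B replaces A's per-index arithmetic loop by slicing the data into four equal columns
-- and transposing them (zip + flatten); objective: more idiomatic. Return values agree on all inputs.

-- ===== PORT A =====
-- literal port of A: slots = int(len(data) / 8); loop appending data[i], data[i+slots], data[i+2*slots], data[i+3*slots]
def re_acomodo (data : List Int) : List Int :=
  let slots : Int := PySem.Int.truncdiv (data.length : Int) 8
  (PySem.List.pyRange 0 slots 1).foldl
    (fun acc i =>
      acc ++ [PySem.List.pyGetD data i 0,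
              PySem.List.pyGetD data (i + slots) 0,
              PySem.List.pyGetD data (i + 2 * slots) 0,
              PySem.List.pyGetD data (i + 3 * slots) 0]) []

-- ===== PORT B =====
-- port of zip(chunk0, chunk1, chunk2, chunk3) flattened row by row (stops at the shortest list, like zip)
def pvInterleave4 : List Int → List Int → List Int → List Int → List Int
  | a :: as, b :: bs, c :: cs, d :: ds => a :: b :: c :: d :: pvInterleave4 as bs cs ds
  | _, _, _, _ => []

def re_acomodo_alt (data : List Int) : List Int :=
  let slots : Int := PySem.Int.floordiv (data.length : Int) 8
  let chunk : Int → List Int := fun k =>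
    PySem.List.slice data (some (k * slots)) (some ((k + 1) * slots))
  pvInterleave4 (chunk 0) (chunk 1) (chunk 2) (chunk 3)

-- ===== PRECONDITION & SPEC =====
def Spec_re_acomodo (data : List Int) (out : List Int) : Prop := out = re_acomodo_alt data
instance (data : List Int) (out : List Int) : Decidable (Spec_re_acomodo data out) := by unfold Spec_re_acomodo; infer_instance

-- ===== CLAIM (what is proved, stated in full; the proofs are below) =====
def Claim_equal_re_acomodo : Prop := ∀ (data : List Int), Dom_re_acomodo data → Spec_re_acomodo data (re_acomodo data)

-- ===== LEMMAS AND PROOFS =====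

-- interleaving four equal-length lists is a flatMap of their rows over the common index range
theorem pvInterleave4_eq_flatMap (as bs cs ds : List Int)
    (hb : bs.length = as.length) (hc : cs.length = as.length) (hd : ds.length = as.length) :
    pvInterleave4 as bs cs ds =
      (List.range as.length).flatMap
        (fun i => [as.getD i 0, bs.getD i 0, cs.getD i 0, ds.getD i 0]) := by
  induction as generalizing bs cs ds with
  | nil =>
    simp at hb hc hd
    simp [hb, hc, hd, pvInterleave4]
  | cons a as ih =>
    cases bs with
    | nil => simp at hb
    | cons b bs =>
      cases cs with
      | nil => simp at hc
      | cons c cs =>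
        cases ds with
        | nil => simp at hd
        | cons d ds =>
          simp at hb hc hd
          rw [pvInterleave4, ih bs cs ds hb hc hd]
          simp [List.range_succ_eq_map, List.flatMap_cons]
          simp [List.flatMap_map]

-- indexing a fixed-width window: element i of (drop a).take s is element a+i of the list
theorem pvTakeDropGetD (l : List Int) (a s i : Nat) (hi : i < s) :
    ((l.drop a).take s).getD i 0 = l.getD (a + i) 0 := by
  simp [List.getD, hi, List.getElem?_drop]

-- a slice with bounds k*s and (k+1)*s (as Ints) is the Nat-indexed window
theorem pvChunkEq (data : List Int) (s kn : Nat) (k : Int) (hk : k = (kn : Int)) :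
    PySem.List.slice data (some (k * (s : Int))) (some ((k + 1) * (s : Int))) =
      (data.drop (kn * s)).take s := by
  subst hk
  have h1 : ((kn : Int) * (s : Int)) = ((kn * s : Nat) : Int) := by push_cast; ring
  have h2 : (((kn : Int) + 1) * (s : Int)) = ((kn * s : Nat) : Int) + (s : Int) := by
    push_cast; ring
  rw [h1, h2, PySem.List.slice_natCast_add]

theorem re_acomodo_spec : Claim_equal_re_acomodo := by
  intro data _
  unfold Spec_re_acomodo re_acomodo re_acomodo_alt
  have hA : PySem.Int.truncdiv (data.length : Int) 8 = ((data.length / 8 : Nat) : Int) := by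
    simp [pysem]; exact Int.neg_inj.mp rfl
  have hB : PySem.Int.floordiv (data.length : Int) 8 = ((data.length / 8 : Nat) : Int) := by
    simp [pysem]
  simp only [hA, hB]
  set s : Nat := data.length / 8 with hs
  have h8 : 8 * s ≤ data.length := by omega
  -- B side: the four chunks are Nat-indexed windows of width s
  rw [pvChunkEq data s 0 0 (by norm_num), pvChunkEq data s 1 1 (by norm_num),
      pvChunkEq data s 2 2 (by norm_num), pvChunkEq data s 3 3 (by norm_num)]
  have hlen : ∀ a : Nat, a + s ≤ data.length → ((data.drop a).take s).length = s := by
    intro a ha; simp; omega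
  have l0 := hlen (0 * s) (by omega)
  have l1 := hlen (1 * s) (by omega)
  have l2 := hlen (2 * s) (by omega)
  have l3 := hlen (3 * s) (by omega)
  rw [pvInterleave4_eq_flatMap _ _ _ _ (l1.trans l0.symm) (l2.trans l0.symm) (l3.trans l0.symm), l0]
  -- A side: the fold over range(slots) is a flatMap over List.range s
  have hrange : PySem.List.pyRange 0 (s : Int) 1 = List.map (fun k : Nat => (k : Int)) (List.range s) := by
    rw [PySem.List.pyRange_one]
    simp only [sub_zero, Int.toNat_natCast, zero_add]
  have hfold : ∀ (g : Int → List Int) (xs : List Int),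
      xs.foldl (fun acc i => acc ++ g i) [] = xs.flatMap g := by
    intro g xs
    simpa using PySem.List.foldl_append_eq_flatMap (g := g) (l := xs) (acc := [])
  rw [hrange, hfold, List.flatMap_map]
  -- now both sides are flatMaps over List.range s; compare rows at each i < s
  rw [List.flatMap_def, List.flatMap_def]
  congr 1
  apply List.map_congr_left
  intro i hi
  have hi' : i < s := List.mem_range.mp hi
  have c1 : ((i : Int) + (s : Int)) = ((1 * s + i : Nat) : Int) := by push_cast; ring
  have c2 : ((i : Int) + 2 * (s : Int)) = ((2 * s + i : Nat) : Int) := by push_cast; ring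
  have c3 : ((i : Int) + 3 * (s : Int)) = ((3 * s + i : Nat) : Int) := by push_cast; ring
  simp only [c1, c2, c3, PySem.List.pyGetD_natCast]
  rw [pvTakeDropGetD _ _ _ _ hi', pvTakeDropGetD _ _ _ _ hi',
      pvTakeDropGetD _ _ _ _ hi', pvTakeDropGetD _ _ _ _ hi']
  simp
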